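-- pv_equiv track=rewrite | github.com/Pinstack/bmad-crewai | src/bmad_crewai/workflow_manager.py | _estimate_implementation_effort
-- ===== SOURCE A (Python) =====
-- from typing import Any, Callable, DefaultDict, Dict, List, Optional
--
-- def _estimate_implementation_effort(
--     recommendations: List[Dict[str, Any]]
-- ) -> str:
--     """Estimate overall implementation effort."""
--     effort_weights = {"low": 1, "medium": 2, "high": 3}
--     total_effort = sum(
--         effort_weights.get(rec.get("effort", "medium"), 2)
--         for rec in recommendations
--     )
--
--     if total_effort <= len(recommendations):
--         return "low"
--     elif total_effort <= len(recommendations) * 2: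
--         return "medium"
--     else:
--         return "high"
-- ===== SOURCE B (Python) =====
-- from typing import Any, Dict, List
--
-- def _estimate_implementation_effort(
--     recommendations: List[Dict[str, Any]]
-- ) -> str:
--     """Estimate overall implementation effort by tallying effort categories."""
--     count_low = count_medium = count_high = 0
--     for rec in recommendations:
--         effort = rec.get("effort", "medium")
--         if effort == "low":
--             count_low += 1
--         elif effort == "high":
--             count_high += 1
--         else:
--             count_medium += 1
--     if count_medium == 0 and count_high == 0:
--         return "low"
--     if count_high <= count_low:
--         return "medium"
--     return "high"
-- ===== Notes on version B (the rewrite author's own statement) =====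
-- stated objective: alternative
-- what changed: B tallies per-category counts (low/medium/high, unknown mapped to medium) in one pass and decides from count comparisons (medium=high=0 -> low; high<=low -> medium; else high) instead of A's weighted sum compared against len-based thresholds.
import Mathlib
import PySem

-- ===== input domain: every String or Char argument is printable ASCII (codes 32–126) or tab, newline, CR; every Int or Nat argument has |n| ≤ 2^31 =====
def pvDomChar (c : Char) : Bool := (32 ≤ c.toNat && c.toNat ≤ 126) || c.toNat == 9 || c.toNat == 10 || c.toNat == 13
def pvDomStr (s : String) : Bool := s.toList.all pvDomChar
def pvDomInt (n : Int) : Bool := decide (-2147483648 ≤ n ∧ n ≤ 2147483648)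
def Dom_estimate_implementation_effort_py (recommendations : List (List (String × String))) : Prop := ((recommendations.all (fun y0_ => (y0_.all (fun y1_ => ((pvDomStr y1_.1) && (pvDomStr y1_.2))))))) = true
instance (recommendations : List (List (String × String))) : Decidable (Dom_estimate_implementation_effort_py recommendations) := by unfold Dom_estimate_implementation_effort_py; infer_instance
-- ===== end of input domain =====

-- B tallies per-category counts (unknown efforts count as medium) and decides from count
-- comparisons, instead of A's weighted sum compared against len-based thresholds (alternative).

-- ===== PORT A =====
-- effort_weights.get(rec.get("effort", "medium"), 2) for one rec
def pvWeightA (rec : List (String × String)) : Int :=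
  (PySem.Dict.ofList [("low", (1 : Int)), ("medium", 2), ("high", 3)]).getD
    ((List.lookup "effort" rec).getD "medium") 2

def estimate_implementation_effort_py (recommendations : List (List (String × String))) : String :=
  let total_effort : Int := recommendations.foldl (fun acc rec => acc + pvWeightA rec) 0
  if total_effort ≤ (recommendations.length : Int) then "low"
  else if total_effort ≤ (recommendations.length : Int) * 2 then "medium"
  else "high"

-- ===== PORT B =====
-- one loop step of B: bump the matching category counter (unknown -> medium)
def pvStepB (t : Int × Int × Int) (rec : List (String × String)) : Int × Int × Int :=
  if (List.lookup "effort" rec).getD "medium" = "low" then (t.1 + 1, t.2.1, t.2.2)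
  else if (List.lookup "effort" rec).getD "medium" = "high" then (t.1, t.2.1, t.2.2 + 1)
  else (t.1, t.2.1 + 1, t.2.2)

def estimate_implementation_effort_py_alt (recommendations : List (List (String × String))) : String :=
  let counts := recommendations.foldl pvStepB ((0 : Int), (0 : Int), (0 : Int))
  if counts.2.1 = 0 ∧ counts.2.2 = 0 then "low"
  else if counts.2.2 ≤ counts.1 then "medium"
  else "high"

-- ===== PRECONDITION & SPEC =====
def Spec_estimate_implementation_effort_py (recommendations : List (List (String × String))) (out : String) : Prop := out = estimate_implementation_effort_py_alt recommendations
instance (recommendations : List (List (String × String))) (out : String) : Decidable (Spec_estimate_implementation_effort_py recommendations out) := by unfold Spec_estimate_implementation_effort_py; infer_instance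

-- ===== CLAIM (what is proved, stated in full; the proofs are below) =====
def Claim_equal_estimate_implementation_effort_py : Prop := ∀ (recommendations : List (List (String × String))), Dom_estimate_implementation_effort_py recommendations → Spec_estimate_implementation_effort_py recommendations (estimate_implementation_effort_py recommendations)

-- ===== LEMMAS AND PROOFS =====

-- one step: the weight added by A equals the increment pattern of B's counters
theorem pv_step_weight (t : Int × Int × Int) (rec : List (String × String)) :
    pvWeightA rec = ((pvStepB t rec).1 - t.1) + 2 * ((pvStepB t rec).2.1 - t.2.1)
      + 3 * ((pvStepB t rec).2.2 - t.2.2)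
    ∧ (pvStepB t rec).1 + (pvStepB t rec).2.1 + (pvStepB t rec).2.2
        = t.1 + t.2.1 + t.2.2 + 1
    ∧ t.1 ≤ (pvStepB t rec).1 ∧ t.2.1 ≤ (pvStepB t rec).2.1 ∧ t.2.2 ≤ (pvStepB t rec).2.2 := by
  unfold pvWeightA pvStepB
  rw [show PySem.Dict.ofList [("low", (1 : Int)), ("medium", 2), ("high", 3)]
        = PySem.Dict.mk [("low", 1), ("medium", 2), ("high", 3)] from by decide]
  generalize (List.lookup "effort" rec).getD "medium" = e
  by_cases h1 : e = "low"
  · subst h1; simp [PySem.Dict.getD_eq_get?_getD, PySem.Dict.get?_mk_cons]; omega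
  · by_cases h2 : e = "high"
    · subst h2; simp [PySem.Dict.getD_eq_get?_getD, PySem.Dict.get?_mk_cons, h1]; omega
    · have hlookup : (PySem.Dict.mk [("low", (1 : Int)), ("medium", 2), ("high", 3)]).getD e 2 = 2 := by
        by_cases h3 : e = "medium"
        · subst h3; simp [PySem.Dict.getD_eq_get?_getD, PySem.Dict.get?_mk_cons]
        · simp [PySem.Dict.getD_eq_get?_getD, Ne.symm h1, Ne.symm h2, Ne.symm h3,
            PySem.Dict.get?]
      rw [hlookup]
      simp [h1, h2]; omega

-- loop invariant: A's running sum and B's counters stay in the stated relation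
theorem pv_fold_inv (l : List (List (String × String))) :
    ∀ (s a b c : Int),
      (l.foldl (fun acc rec => acc + pvWeightA rec) s) - s
        = ((l.foldl pvStepB (a, b, c)).1 - a) + 2 * ((l.foldl pvStepB (a, b, c)).2.1 - b)
          + 3 * ((l.foldl pvStepB (a, b, c)).2.2 - c)
      ∧ (l.foldl pvStepB (a, b, c)).1 + (l.foldl pvStepB (a, b, c)).2.1
          + (l.foldl pvStepB (a, b, c)).2.2 = a + b + c + (l.length : Int)
      ∧ a ≤ (l.foldl pvStepB (a, b, c)).1 ∧ b ≤ (l.foldl pvStepB (a, b, c)).2.1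
      ∧ c ≤ (l.foldl pvStepB (a, b, c)).2.2 := by
  induction l with
  | nil => intro s a b c; simp
  | cons rec tl ih =>
    intro s a b c
    simp only [List.foldl_cons, List.length_cons]
    obtain ⟨hw, hn, h1, h2, h3⟩ := pv_step_weight (a, b, c) rec
    rcases hp : pvStepB (a, b, c) rec with ⟨pa, pb, pc⟩
    rw [hp] at hw hn h1 h2 h3
    obtain ⟨ihw, ihn, ih1, ih2, ih3⟩ := ih (s + pvWeightA rec) pa pb pc
    push_cast at *
    refine ⟨by omega, by omega, by omega, by omega, by omega⟩

-- ===== VERDICT (by name: the statement is the Claim_ definition above) =====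
theorem estimate_implementation_effort_py_spec : Claim_equal_estimate_implementation_effort_py := by
  intro recommendations _
  unfold Spec_estimate_implementation_effort_py
  simp only [estimate_implementation_effort_py, estimate_implementation_effort_py_alt]
  obtain ⟨hw, hn, h1, h2, h3⟩ := pv_fold_inv recommendations 0 0 0 0
  simp only [sub_zero] at hw hn
  set cnts := recommendations.foldl pvStepB ((0 : Int), (0 : Int), (0 : Int)) with hc
  split_ifs with ha1 ha2 hb1 hb2 hb1 hb2 hb1 hb2 <;> first
    | rfl
    | (exfalso; push_cast at *; omega)
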